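-- pv_equiv track=rewrite | github.com/collinsakenga/codewars_solutions | 6 kyu/Maximum Depth of Nested Brackets.py | strings_in_max_depth
-- ===== SOURCE A (Python) =====
-- def strings_in_max_depth(s):
--     maxi=cur=0
--     res=[]
--     temp=[]
--     for i in s:
--         if i in "()":
--             if cur>maxi:
--                 res=["".join(temp)]
--                 maxi=cur
--             elif cur==maxi:
--                 res.append("".join(temp))
--             cur+=1 if i=="(" else -1
--             temp=[]
--         else:
--             temp.append(i)
--     return res if res else ["".join(temp)]
-- ===== SOURCE B (Python) =====
-- def strings_in_max_depth(s):
--     segments = []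
--     depth = 0
--     temp = []
--     for ch in s:
--         if ch == '(' or ch == ')':
--             segments.append((depth, ''.join(temp)))
--             depth += 1 if ch == '(' else -1
--             temp = []
--         else:
--             temp.append(ch)
--     if segments:
--         maxd = max(d for d, _ in segments)
--         return [seg for d, seg in segments if d == maxd]
--     return [''.join(temp)]
-- ===== Notes on version B (the rewrite author's own statement) =====
-- stated objective: alternative
-- what changed: B records all (depth, segment) pairs in one pass and filters by the maximum depth afterwards, instead of A's incremental reset/append maintenance of the running-max result list.
import Mathlib
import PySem

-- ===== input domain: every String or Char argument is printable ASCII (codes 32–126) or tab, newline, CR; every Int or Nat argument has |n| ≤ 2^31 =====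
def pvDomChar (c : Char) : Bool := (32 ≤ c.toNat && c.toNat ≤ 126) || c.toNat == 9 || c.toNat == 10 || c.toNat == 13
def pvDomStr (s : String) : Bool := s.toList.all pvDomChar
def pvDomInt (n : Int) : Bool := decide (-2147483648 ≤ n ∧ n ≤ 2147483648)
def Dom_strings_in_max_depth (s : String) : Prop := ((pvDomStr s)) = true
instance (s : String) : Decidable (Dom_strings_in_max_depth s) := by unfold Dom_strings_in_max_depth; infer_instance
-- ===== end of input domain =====

-- B builds a (depth, segment) table in one pass and filters by the maximum depth afterwards,
-- instead of A's incremental reset/append maintenance of the running-max result list (alternative decomposition, same cost).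


-- ===== PORT A =====
-- state: (maxi, cur, res, temp), exactly A's four variables
def aStep : (Int × Int × List String × List Char) → Char → (Int × Int × List String × List Char)
  | (maxi, cur, res, temp), c =>
    if c = '(' ∨ c = ')' then
      let rm : List String × Int :=
        if cur > maxi then ([String.ofList temp], cur)
        else if cur = maxi then (res ++ [String.ofList temp], maxi)
        else (res, maxi)
      (rm.2, cur + (if c = '(' then 1 else -1), rm.1, [])
    else (maxi, cur, res, temp ++ [c])

def strings_in_max_depth (s : String) : List String :=
  let st := s.toList.foldl aStep (0, 0, [], [])
  if st.2.2.1 = [] then [String.ofList st.2.2.2] else st.2.2.1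

-- ===== PORT B =====
-- state: (segments, depth, temp)
def bStep : (List (Int × String) × Int × List Char) → Char → (List (Int × String) × Int × List Char)
  | (segs, depth, temp), c =>
    if c = '(' ∨ c = ')' then
      (segs ++ [(depth, String.ofList temp)], depth + (if c = '(' then 1 else -1), [])
    else (segs, depth, temp ++ [c])

def strings_in_max_depth_alt (s : String) : List String :=
  let st := s.toList.foldl bStep ([], 0, [])
  match PySem.List.max? (st.1.map Prod.fst) (fun x => x) with
  | some m => (st.1.filter (fun p => p.1 = m)).map Prod.snd
  | none => [String.ofList st.2.2]

-- ===== PRECONDITION & SPEC =====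
def Spec_strings_in_max_depth (s : String) (out : List String) : Prop := out = strings_in_max_depth_alt s
instance (s : String) (out : List String) : Decidable (Spec_strings_in_max_depth s out) := by unfold Spec_strings_in_max_depth; infer_instance

-- ===== CLAIM (what is proved, stated in full; the proofs are below) =====
def Claim_equal_strings_in_max_depth : Prop := ∀ (s : String), Dom_strings_in_max_depth s → Spec_strings_in_max_depth s (strings_in_max_depth s)

-- ===== LEMMAS AND PROOFS =====

-- A's running maximum, expressed over B's segment table
def pvMx (segs : List (Int × String)) : Int := (segs.map Prod.fst).foldl max 0

-- A's result list, expressed over B's segment table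
def pvRender (segs : List (Int × String)) : List String :=
  (segs.filter (fun p => p.1 = pvMx segs)).map Prod.snd

-- abstraction: the A-state corresponding to a B-state
def pvAbs (st : List (Int × String) × Int × List Char) : Int × Int × List String × List Char :=
  (pvMx st.1, st.2.1, pvRender st.1, st.2.2)

theorem pvMx_append (segs : List (Int × String)) (d : Int) (x : String) :
    pvMx (segs ++ [(d, x)]) = max (pvMx segs) d := by
  simp [pvMx, List.foldl_append]

theorem pvMx_le (segs : List (Int × String)) {p : Int × String} (h : p ∈ segs) :
    p.1 ≤ pvMx segs := by
  have := (PySem.List.le_foldl_max (segs.map Prod.fst) 0).2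
  exact this p.1 (List.mem_map_of_mem h)

theorem pvRender_append (segs : List (Int × String)) (d : Int) (x : String) :
    pvRender (segs ++ [(d, x)]) =
      if pvMx segs < d then [x]
      else if d = pvMx segs then pvRender segs ++ [x]
      else pvRender segs := by
  simp only [pvRender, pvMx_append, List.filter_append, List.map_append]
  rcases lt_trichotomy (pvMx segs) d with h | h | h
  · rw [if_pos h, max_eq_right (le_of_lt h)]
    have hnil : segs.filter (fun p => decide (p.1 = d)) = [] := by
      rw [List.filter_eq_nil_iff]
      intro p hp hq
      have := pvMx_le segs hp
      simp at hq
      omega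
    simp [hnil]
  · rw [if_neg (by omega), if_pos h.symm, max_eq_left (le_of_eq h.symm)]
    simp [h]
  · rw [if_neg (by omega), if_neg (by omega), max_eq_left (le_of_lt h)]
    have : ¬ ((d, x).1 = pvMx segs) := by simp; omega
    simp [this]

theorem pvStep_comm (st : List (Int × String) × Int × List Char) (c : Char) :
    aStep (pvAbs st) c = pvAbs (bStep st c) := by
  obtain ⟨segs, d, t⟩ := st
  by_cases hb : c = '(' ∨ c = ')'
  · simp only [aStep, bStep, pvAbs, if_pos hb]
    rw [pvMx_append, pvRender_append]
    rcases lt_trichotomy (pvMx segs) d with h | h | h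
    · simp only [if_pos h, max_eq_right (le_of_lt h)]
    · simp only [if_neg (by omega : ¬ pvMx segs < d), if_pos h.symm,
        max_eq_left (le_of_eq h.symm)]
    · simp only [if_neg (by omega : ¬ pvMx segs < d), if_neg (by omega : ¬ d = pvMx segs),
        max_eq_left (le_of_lt h)]
  · simp only [aStep, bStep, pvAbs, if_neg hb]

theorem pvFold_comm (cs : List Char) (st : List (Int × String) × Int × List Char) :
    cs.foldl aStep (pvAbs st) = pvAbs (cs.foldl bStep st) := by
  induction cs generalizing st with
  | nil => rfl
  | cons c cs ih => simp only [List.foldl_cons, pvStep_comm, ih]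

-- reachability invariant: the first recorded segment is at depth 0
def pvInv (st : List (Int × String) × Int × List Char) : Prop :=
  (st.1 = [] ∧ st.2.1 = 0) ∨ (0 : Int) ∈ st.1.map Prod.fst

theorem pvInv_step (st : List (Int × String) × Int × List Char) (c : Char)
    (h : pvInv st) : pvInv (bStep st c) := by
  obtain ⟨segs, d, t⟩ := st
  by_cases hb : c = '(' ∨ c = ')'
  · simp only [bStep, if_pos hb, pvInv]
    rcases h with ⟨h1, h2⟩ | h
    · right; simp at h1 h2 ⊢; subst h1 h2; simp
    · right; simp at h ⊢; tauto
  · simpa only [bStep, if_neg hb] using h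

theorem pvInv_fold (cs : List Char) (st : List (Int × String) × Int × List Char)
    (h : pvInv st) : pvInv (cs.foldl bStep st) := by
  induction cs generalizing st with
  | nil => exact h
  | cons c cs ih => exact ih _ (pvInv_step _ _ h)

theorem pv_foldl_max_max (t : List Int) (a b : Int) :
    t.foldl max (max a b) = max a (t.foldl max b) := by
  induction t generalizing b with
  | nil => rfl
  | cons c t ih =>
    simp only [List.foldl_cons, max_assoc, ih]

-- if 0 occurs among the depths, Python's max(ds) equals A's 0-floored running max
theorem pv_max?_eq_pvMx (segs : List (Int × String)) (h0 : (0 : Int) ∈ segs.map Prod.fst) :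
    PySem.List.max? (segs.map Prod.fst) (fun x => x) = some (pvMx segs) := by
  cases hds : segs.map Prod.fst with
  | nil => simp [hds] at h0
  | cons x t =>
    rw [PySem.List.max?_id_cons]
    congr 1
    have hx : x ≤ t.foldl max x := (PySem.List.le_foldl_max t x).1
    have ht : ∀ y ∈ t, y ≤ t.foldl max x := (PySem.List.le_foldl_max t x).2
    have h0le : (0 : Int) ≤ t.foldl max x := by
      rw [hds] at h0
      rcases List.mem_cons.mp h0 with h | h
      · omega
      · exact ht 0 h
    have : pvMx segs = max 0 (t.foldl max x) := by
      simp only [pvMx, hds, List.foldl_cons]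
      have := pv_foldl_max_max t 0 x
      simpa using this
    rw [this]
    omega

theorem pvRender_ne_nil (segs : List (Int × String)) (h0 : (0 : Int) ∈ segs.map Prod.fst) :
    pvRender segs ≠ [] := by
  have hex : ∃ q ∈ segs, q.1 = pvMx segs := by
    rcases PySem.List.foldl_max_mem (segs.map Prod.fst) 0 with h | h
    · rcases List.mem_map.mp h0 with ⟨p, hp, hp1⟩
      exact ⟨p, hp, by unfold pvMx; rw [h]; exact hp1⟩
    · rcases List.mem_map.mp h with ⟨q, hq, hq1⟩
      exact ⟨q, hq, hq1⟩
  rcases hex with ⟨q, hq, hq1⟩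
  have hmem : q.2 ∈ pvRender segs :=
    List.mem_map_of_mem (List.mem_filter.mpr ⟨hq, by simp [hq1]⟩)
  exact List.ne_nil_of_mem hmem

-- ===== VERDICT (by name: the statement is the Claim_ definition above) =====
theorem strings_in_max_depth_spec : Claim_equal_strings_in_max_depth := by
  intro s _
  have habs : s.toList.foldl aStep (0, 0, [], []) = pvAbs (s.toList.foldl bStep ([], 0, [])) := by
    have h := pvFold_comm s.toList ([], 0, [])
    simpa [pvAbs, pvMx, pvRender] using h
  have hinv : pvInv (s.toList.foldl bStep ([], 0, [])) :=
    pvInv_fold s.toList ([], 0, []) (Or.inl ⟨rfl, rfl⟩)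
  unfold Spec_strings_in_max_depth strings_in_max_depth strings_in_max_depth_alt
  dsimp only
  rw [habs]
  set st := s.toList.foldl bStep ([], 0, []) with hst
  rcases hinv with ⟨h1, _⟩ | h0
  · simp [pvAbs, h1, pvRender, PySem.List.max?]
  · rw [pv_max?_eq_pvMx st.1 h0]
    dsimp only [pvAbs]
    rw [if_neg (pvRender_ne_nil st.1 h0)]
    simp [pvRender]
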